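-- pv_equiv track=rewrite | github.com/emily310zhou/Python-Software-Design | Spiral.py | sub_grid
-- ===== SOURCE A (Python) =====
-- def sub_grid (grid, val):
--     #initializes the 2d lists -- 4 different sizes
--     sub_grid_3x3 = [[0] * 3 for i in range(3)]
--     sub_grid_2x3 = [[0] * 3 for i in range(2)]
--     sub_grid_2x2 = [[0] * 2 for i in range(2)]
--     sub_grid_3x2 = [[0] * 2 for i in range(3)]
--
--     #find value in list and return coordinates
--     for row, grid_list in enumerate(grid):#goes through the grid
--         for num in grid_list:
--             if num == val:#if it matches val
--                 val_row = row #find the row of the location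
--                 val_col = grid_list.index(num) #find the column of location
--
--     #determine if value is edge piece
--     if len(grid) == 1 and val == 1:#if it happens to be a one by one list
--         return grid
--     elif val_row == 0 and val_col == 0: #top left corner piece
--         for row in range(2):
--             for col in range(2):#go through the 2x2 surrounding numbers
--                 sub_grid_2x2[row][col] = grid[val_row][val_col]#put values from grid into the sub grid
--                 val_col += 1#add one to location of col
--             val_col -= 2#reset location of col
--             val_row += 1 #add one to location of row
--         return sub_grid_2x2#return filled sub grid
--     elif val_row == len(grid) - 1 and val_col == 0: #bottom left corner
--         for row in range(2):
--             for col in range(2):#go through the 2x2 surrounding numbers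
--                 sub_grid_2x2[row][col] = grid[val_row-1][val_col]#put values from grid into the sub grid
--                 val_col += 1#add one to location of col
--             val_col -= 2#reset location of col
--             val_row += 1#add one to location of row
--         return sub_grid_2x2#return filled sub grid
--     elif val_row == 0 and val_col == len(grid) - 1: #top right corner
--         for row in range(2):
--             for col in range(2):#go through the 2x2 surrounding numbers
--                 sub_grid_2x2[row][col] = grid[val_row][val_col-1]#put values from grid into the sub grid
--                 val_col += 1
--             val_col -= 2#reset location of col
--             val_row += 1
--         return sub_grid_2x2#return filled sub grid
--     elif val_row == len(grid) - 1 and val_col == len(grid) - 1: #bottom right corner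
--         for row in range(2):
--             for col in range(2):#go through the 2x2 surrounding numbers
--                 sub_grid_2x2[row][col] = grid[val_row-1][val_col-1]#put values from grid into the sub grid
--                 val_col += 1
--             val_col -= 2#reset location of columns
--             val_row += 1
--         return sub_grid_2x2#return filled sub grid
--     elif val_row == 0: #top row
--         for row in range(2):
--             for col in range(3):#go through the 2x3 surrounding numbers
--                 sub_grid_2x3[row][col] = grid[val_row][val_col-1]#put values from grid into the sub grid
--                 val_col += 1
--             val_col -= 3#reset location of columns
--             val_row += 1
--         return sub_grid_2x3#return filled sub grid
--     elif val_row == len(grid) - 1: #bottom row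
--         for row in range(2):
--             for col in range(3):#go through the 2x3 surrounding numbers
--                 sub_grid_2x3[row][col] = grid[val_row-1][val_col-1]#put values from grid into the sub grid
--                 val_col += 1
--             val_col -= 3#reset location of columns
--             val_row += 1
--         return sub_grid_2x3#return filled sub grid
--     elif val_col == 0: #left column
--         for row in range(3):
--             for col in range(2):#go through the 3x2 surrounding numbers
--                 sub_grid_3x2[row][col] = grid[val_row-1][val_col]#put values from grid into the sub grid
--                 val_col += 1
--             val_col -= 2#reset location of columns
--             val_row += 1
--         return sub_grid_3x2
--     elif val_col == len(grid) - 1: #right column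
--         for row in range(3):
--             for col in range(2):#go through the 3x2 surrounding numbers
--                 sub_grid_3x2[row][col] = grid[val_row-1][val_col-1]#put values from grid into the sub grid
--                 val_col += 1
--             val_col -= 2#reset location of columns
--             val_row += 1
--         return sub_grid_3x2#return filled sub grid
--     else: #normal 3 by 3 case
--         for row in range(3):
--             for col in range(3):#go through the 3x3 surrounding numbers
--                 sub_grid_3x3[row][col] = grid[val_row-1][val_col-1]#put values from grid into the sub grid
--                 val_col += 1
--             val_col -= 3#reset location of columns
--             val_row += 1
--         return sub_grid_3x3#return filled sub grid
-- ===== SOURCE B (Python) =====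
-- def sub_grid(grid, val):
--     # Locate val: last row containing it, first column within that row.
--     for r, row in enumerate(grid):
--         if val in row:
--             val_row, val_col = r, row.index(val)
--
--     if len(grid) == 1 and val == 1:
--         return grid
--
--     # Neighborhood by distance: keep every cell whose row and column index are
--     # within 1 of the location; enumeration clamps at the true grid boundaries.
--     return [[x for j, x in enumerate(row) if abs(j - val_col) <= 1]
--             for i, row in enumerate(grid) if abs(i - val_row) <= 1]
-- ===== Notes on version B (the rewrite author's own statement) =====
-- stated objective: simpler
-- what changed: B replaces A's nine corner/edge branches, each with its own preallocated buffer and cursor-mutating double fill loop, by a whole-grid double filter that keeps every cell whose row and column index lie within 1 of val's location, clamped by enumeration at the true boundaries.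
-- intended difference: On grids whose rows extend past column len(grid)-1 with val found in column len(grid)-1, A misclassifies val as a right-edge cell (it compares the column against the row COUNT) and returns a truncated 2-wide window, while B clamps at the actual row ends and returns the full 3-wide neighborhood, the intended value. — e.g. on sub_grid([[1,2,3],[4,5,6]], 2): A returns [[1,2],[4,5]], B returns [[1,2,3],[4,5,6]]
import Mathlib
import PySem

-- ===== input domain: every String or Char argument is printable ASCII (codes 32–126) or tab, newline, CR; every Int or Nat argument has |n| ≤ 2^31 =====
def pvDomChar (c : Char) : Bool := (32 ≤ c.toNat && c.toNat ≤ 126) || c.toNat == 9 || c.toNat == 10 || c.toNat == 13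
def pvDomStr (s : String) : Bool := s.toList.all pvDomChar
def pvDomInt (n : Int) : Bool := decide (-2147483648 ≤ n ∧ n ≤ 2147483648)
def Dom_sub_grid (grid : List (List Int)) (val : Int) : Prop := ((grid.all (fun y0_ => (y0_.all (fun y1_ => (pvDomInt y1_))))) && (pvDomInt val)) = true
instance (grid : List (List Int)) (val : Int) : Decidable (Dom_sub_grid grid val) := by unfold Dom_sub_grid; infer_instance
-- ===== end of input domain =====

-- B replaces A's branch-directed block copy (nine corner/edge branches, each a
-- cursor-mutating double fill loop over a preallocated buffer) by a whole-grid
-- filter keeping every cell within index distance 1 of val's location; simpler.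
-- Return-value equivalence only (A's 1x1 special case returns the argument by
-- reference; B does the same).

-- grid[r][c] with IndexError = none; A only ever indexes with nonnegative
-- indices in its branches; .getD 0 is never the returned value on Pre_
-- (Pre_ demands every read in range).
def pvGet2 (grid : List (List Int)) (r c : Int) : Int :=
  ((PySem.List.pyGet? grid r).bind (fun row => PySem.List.pyGet? row c)).getD 0

-- ===== PORT A =====
-- A's search loop: for row, grid_list in enumerate(grid): for num in grid_list:
-- if num == val: val_row, val_col = row, grid_list.index(num).
-- grid_list.index(num) cannot raise (num ∈ grid_list), so idxOf is exact.
-- Result none = the Python variables stay unbound (UnboundLocalError later).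
def pvLocA (grid : List (List Int)) (val : Int) : Option (Int × Int) :=
  (PySem.List.enumerate grid).foldl
    (fun acc p =>
      p.2.foldl
        (fun acc2 num =>
          if num = val then some (p.1, ((p.2.idxOf num : Nat) : Int)) else acc2)
        acc)
    none

-- A's per-branch fill loop: for row in range(nr): for col in range(nc):
-- sub[row][col] = grid[vr+dr][vc+dc]; vc += 1 … vc -= nc; vr += 1.
-- The preallocated sub-grid written cell by cell in order is built by appending.
def pvFillA (grid : List (List Int)) (nr nc : Nat) (vr vc dr dc : Int) : List (List Int) :=
  ((List.range nr).foldl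
    (fun (st : List (List Int) × Int × Int) _ =>
      let inner := (List.range nc).foldl
        (fun (st2 : List Int × Int) _ =>
          (st2.1 ++ [pvGet2 grid (st.2.1 + dr) (st2.2 + dc)], st2.2 + 1))
        ([], st.2.2)
      (st.1 ++ [inner.1], st.2.1 + 1, inner.2 - (nc : Int)))
    ([], vr, vc)).1

def sub_grid (grid : List (List Int)) (val : Int) : List (List Int) :=
  if grid.length = 1 ∧ val = 1 then grid
  else
    match pvLocA grid val with
    | none => []   -- Python raises UnboundLocalError here; excluded by Pre_
    | some (r, c) =>
      if r = 0 ∧ c = 0 then pvFillA grid 2 2 r c 0 0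
      else if r = (grid.length : Int) - 1 ∧ c = 0 then pvFillA grid 2 2 r c (-1) 0
      else if r = 0 ∧ c = (grid.length : Int) - 1 then pvFillA grid 2 2 r c 0 (-1)
      else if r = (grid.length : Int) - 1 ∧ c = (grid.length : Int) - 1 then pvFillA grid 2 2 r c (-1) (-1)
      else if r = 0 then pvFillA grid 2 3 r c 0 (-1)
      else if r = (grid.length : Int) - 1 then pvFillA grid 2 3 r c (-1) (-1)
      else if c = 0 then pvFillA grid 3 2 r c (-1) 0
      else if c = (grid.length : Int) - 1 then pvFillA grid 3 2 r c (-1) (-1)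
      else pvFillA grid 3 3 r c (-1) (-1)

-- ===== PORT B =====
-- B's search loop: for r, row in enumerate(grid): if val in row:
-- val_row, val_col = r, row.index(val)  (row.index(val) cannot raise: val ∈ row).
def pvLocB (grid : List (List Int)) (val : Int) : Option (Int × Int) :=
  (PySem.List.enumerate grid).foldl
    (fun acc p =>
      if val ∈ p.2 then some (p.1, ((p.2.idxOf val : Nat) : Int)) else acc)
    none

-- B's double filtering comprehension:
-- [[x for j, x in enumerate(row) if abs(j - val_col) <= 1]
--  for i, row in enumerate(grid) if abs(i - val_row) <= 1]
def sub_grid_alt (grid : List (List Int)) (val : Int) : List (List Int) :=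
  if grid.length = 1 ∧ val = 1 then grid
  else
    match pvLocB grid val with
    | none => []   -- Python raises UnboundLocalError here; excluded by Pre_
    | some (r, c) =>
      ((PySem.List.enumerate grid).filter (fun p => decide ((p.1 - r).natAbs ≤ 1))).map
        (fun p => ((PySem.List.enumerate p.2).filter (fun q => decide ((q.1 - c).natAbs ≤ 1))).map (fun q => q.2))

-- ===== PRECONDITION & SPEC =====
-- val's location stated independently of the ports: the LAST row containing val
-- (first match of the reversed enumeration), and val's first index in that row.
def pvLastLoc (grid : List (List Int)) (val : Int) : Option (Int × Int) :=
  match (PySem.List.enumerate grid).reverse.find? (fun p => p.2.contains val) with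
  | none => none
  | some p => some (p.1, ((p.2.idxOf val : Nat) : Int))

-- Pre_: exactly the inputs where Python A returns normally: either the 1x1-and-
-- val==1 special case, or val occurs in the grid and every grid cell A's chosen
-- window reads exists (otherwise A raises UnboundLocalError or IndexError).
def pvPreCheck (grid : List (List Int)) (val : Int) : Bool :=
  (decide (grid.length = 1 ∧ val = 1)) ||
  (match pvLastLoc grid val with
   | none => false
   | some (r, c) =>
     let n : Int := (grid.length : Int)
     let r0 := if r = 0 then r else r - 1
     let nr : Nat := if r = 0 ∨ r = n - 1 then 2 else 3
     let c0 := if c = 0 then c else c - 1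
     let nc : Nat := if c = 0 ∨ c = n - 1 then 2 else 3
     (List.range nr).all (fun (i : Nat) =>
       match PySem.List.pyGet? grid (r0 + (i : Int)) with
       | none => false
       | some row => (List.range nc).all (fun (j : Nat) => decide (c0 + (j : Int) < (row.length : Int)))))

def Pre_sub_grid (grid : List (List Int)) (val : Int) : Prop := pvPreCheck grid val = true
instance (grid : List (List Int)) (val : Int) : Decidable (Pre_sub_grid grid val) := by
  unfold Pre_sub_grid; infer_instance

def pvWitness_sub_grid : List (List Int) × Int := ([[1,2,3],[4,5,6],[7,8,9]], 5)

-- On grids whose rows extend past column len(grid)-1 with val found in column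
-- len(grid)-1, A misclassifies val as a right-edge cell (it compares the column
-- against the ROW COUNT) and returns a truncated 2-wide window; B clamps at the
-- actual row ends and returns the full 3-wide neighborhood, the intended value.
def D_sub_grid (grid : List (List Int)) (val : Int) : Prop :=
  let rn := grid.length - 1 - grid.reverse.findIdx (fun t => decide (val ∈ t))
  val ∈ grid.flatten ∧ (grid.getD rn []).idxOf val + 1 = grid.length ∧ 2 ≤ grid.length ∧
  ∃ k ∈ [rn - 1, rn, rn + 1], grid.length < (grid.getD k []).length
instance (grid : List (List Int)) (val : Int) : Decidable (D_sub_grid grid val) := by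
  unfold D_sub_grid; infer_instance

def Spec_sub_grid (grid : List (List Int)) (val : Int) (out : List (List Int)) : Prop :=
  ¬ D_sub_grid grid val → out = sub_grid_alt grid val
instance (grid : List (List Int)) (val : Int) (out : List (List Int)) : Decidable (Spec_sub_grid grid val out) := by
  unfold Spec_sub_grid; infer_instance

def pvDiffWitness_sub_grid : List (List Int) × Int := ([[1,2,3],[4,5,6]], 2)
def pvDiffWitnessOut_sub_grid : (List (List Int)) × (List (List Int)) :=
  ([[1,2],[4,5]], [[1,2,3],[4,5,6]])

-- ===== CLAIM (what is proved, stated in full; the proofs are below) =====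
def Claim_unchanged_sub_grid : Prop := ∀ (grid : List (List Int)) (val : Int), Dom_sub_grid grid val → Pre_sub_grid grid val → Spec_sub_grid grid val (sub_grid grid val)
def Claim_changed_sub_grid : Prop := Dom_sub_grid (pvDiffWitness_sub_grid.1) (pvDiffWitness_sub_grid.2) ∧ Pre_sub_grid (pvDiffWitness_sub_grid.1) (pvDiffWitness_sub_grid.2) ∧ D_sub_grid (pvDiffWitness_sub_grid.1) (pvDiffWitness_sub_grid.2) ∧ sub_grid (pvDiffWitness_sub_grid.1) (pvDiffWitness_sub_grid.2) = pvDiffWitnessOut_sub_grid.1 ∧ sub_grid_alt (pvDiffWitness_sub_grid.1) (pvDiffWitness_sub_grid.2) = pvDiffWitnessOut_sub_grid.2 ∧ pvDiffWitnessOut_sub_grid.1 ≠ pvDiffWitnessOut_sub_grid.2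
def Claim_exact_sub_grid : Prop := ∀ (grid : List (List Int)) (val : Int), Dom_sub_grid grid val → Pre_sub_grid grid val → D_sub_grid grid val → sub_grid grid val ≠ sub_grid_alt grid val

-- ===== LEMMAS AND PROOFS =====

-- B's window, as a map over index ranges: the intermediate form both sides reach.
def pvWindow (grid : List (List Int)) (r0 c0 : Int) (nr nc : Nat) : List (List Int) :=
  (List.range nr).map (fun (i : Nat) =>
    (List.range nc).map (fun (j : Nat) => pvGet2 grid (r0 + (i : Int)) (c0 + (j : Int))))

-- A's inner search loop over one row equals B's 'if val in row' test.
lemma pvRowFold_eq (val rI : Int) (whole : List Int) :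
    ∀ (l : List Int) (acc : Option (Int × Int)),
      l.foldl (fun acc2 num =>
          if num = val then some (rI, ((whole.idxOf num : Nat) : Int)) else acc2) acc
        = if val ∈ l then some (rI, ((whole.idxOf val : Nat) : Int)) else acc := by
  intro l
  induction l with
  | nil => intro acc; simp
  | cons x xs ih =>
    intro acc
    by_cases h : x = val
    · subst h
      simp [List.foldl_cons, ih]
    · simp [List.foldl_cons, h, ih, Ne.symm h]

lemma pvLocA_eq_pvLocB (grid : List (List Int)) (val : Int) :
    pvLocA grid val = pvLocB grid val := by
  unfold pvLocA pvLocB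
  generalize PySem.List.enumerate grid = l
  suffices h : ∀ (l : List (Int × List Int)) (acc : Option (Int × Int)),
      l.foldl (fun acc p =>
        p.2.foldl (fun acc2 num =>
          if num = val then some (p.1, ((p.2.idxOf num : Nat) : Int)) else acc2) acc) acc
      = l.foldl (fun acc p =>
          if val ∈ p.2 then some (p.1, ((p.2.idxOf val : Nat) : Int)) else acc) acc by
    exact h l none
  intro l
  induction l with
  | nil => intro acc; rfl
  | cons p ps ih =>
    intro acc
    simp only [List.foldl_cons, pvRowFold_eq]

-- a fold that keeps the LAST match equals first match on the reversed list
lemma foldl_last_find {α β : Type} (C : α → Bool) (f : α → β) :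
    ∀ (l : List α) (acc : Option β),
      l.foldl (fun acc p => if C p then some (f p) else acc) acc
        = match l.reverse.find? C with
          | some p => some (f p)
          | none => acc := by
  intro l
  induction l with
  | nil => intro acc; rfl
  | cons x xs ih =>
    intro acc
    simp only [List.foldl_cons, List.reverse_cons, List.find?_append, ih]
    cases hf : xs.reverse.find? C with
    | some p => simp
    | none =>
      by_cases hC : C x <;> simp [List.find?, hC]

lemma pvLocB_eq_pvLastLoc (grid : List (List Int)) (val : Int) :
    pvLocB grid val = pvLastLoc grid val := by
  unfold pvLocB pvLastLoc
  have h := foldl_last_find (fun p : Int × List Int => p.2.contains val)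
      (fun p : Int × List Int => (p.1, ((p.2.idxOf val : Nat) : Int)))
      (PySem.List.enumerate grid) none
  rw [show (fun (acc : Option (Int × Int)) (p : Int × List Int) =>
        if val ∈ p.2 then some (p.1, ((p.2.idxOf val : Nat) : Int)) else acc)
      = (fun acc p => if (fun p : Int × List Int => p.2.contains val) p
          then some ((fun p : Int × List Int => (p.1, ((p.2.idxOf val : Nat) : Int))) p) else acc) by
    funext acc p
    by_cases hm : val ∈ p.2 <;> simp [hm]]
  rw [h]
  cases (PySem.List.enumerate grid).reverse.find? (fun p => p.2.contains val) <;> rfl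

lemma pvEnumerate_append_singleton {α : Type} :
    ∀ (xs : List α) (x : α) (s : Int), PySem.List.enumerate (xs ++ [x]) s
      = PySem.List.enumerate xs s ++ [(s + (xs.length : Int), x)] := by
  intro xs
  induction xs with
  | nil => intro x s; simp [PySem.List.enumerate_cons, PySem.List.enumerate_nil]
  | cons y ys ih =>
    intro x s
    rw [List.cons_append, PySem.List.enumerate_cons, ih, PySem.List.enumerate_cons]
    simp only [List.cons_append, List.length_cons]
    have h : s + 1 + (ys.length : Int) = s + ((ys.length + 1 : Nat) : Int) := by push_cast; ring
    rw [h]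

lemma pvLastLoc_append (grid : List (List Int)) (row : List Int) (val : Int) :
    pvLastLoc (grid ++ [row]) val
      = if val ∈ row then some ((grid.length : Int), ((row.idxOf val : Nat) : Int))
        else pvLastLoc grid val := by
  unfold pvLastLoc
  rw [pvEnumerate_append_singleton, List.reverse_append]
  simp only [List.reverse_singleton, List.singleton_append, List.find?_cons]
  by_cases hm : val ∈ row
  · simp [hm]
  · have hc : (row.contains val) = false := by simp [hm]
    simp only [hc]
    rw [if_neg hm]

-- pvLastLoc located exactly the last row containing val and val's first index
lemma pvLastLoc_iff (grid : List (List Int)) (val : Int) (r c : Int) :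
    pvLastLoc grid val = some (r, c)
      ↔ ∃ rn : Nat, (rn : Int) = r ∧ rn < grid.length ∧ val ∈ grid.getD rn [] ∧
          (∀ k : Nat, k < grid.length → rn < k → val ∉ grid.getD k []) ∧
          c = (((grid.getD rn []).idxOf val : Nat) : Int) := by
  induction grid using List.reverseRecOn with
  | nil =>
    unfold pvLastLoc
    simp [PySem.List.enumerate_nil]
  | append_singleton xs x ih =>
    rw [pvLastLoc_append]
    by_cases hm : val ∈ x
    · rw [if_pos hm]
      constructor
      · intro h
        rw [Option.some_inj, Prod.mk.injEq] at h
        refine ⟨xs.length, h.1, by simp, ?_, ?_, ?_⟩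
        · rw [List.getD_append_right xs [x] [] xs.length (le_refl _)]
          simpa using hm
        · intro k hk1 hk2
          simp at hk1
          omega
        · rw [List.getD_append_right xs [x] [] xs.length (le_refl _)]
          simpa using h.2.symm
      · rintro ⟨rn, hr, hlen, hmem, hlast, hc⟩
        simp only [List.length_append, List.length_cons, List.length_nil] at hlen
        rcases (by omega : rn = xs.length ∨ rn < xs.length) with heq | hlt
        · subst heq
          rw [List.getD_append_right xs [x] [] xs.length (le_refl _)] at hc
          simp at hc
          rw [hc, hr]
        · exfalso
          have := hlast xs.length (by simp) hlt
          rw [List.getD_append_right xs [x] [] xs.length (le_refl _)] at this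
          simp at this
          exact this hm
    · rw [if_neg hm, ih]
      constructor
      · rintro ⟨rn, hr, hlen, hmem, hlast, hc⟩
        refine ⟨rn, hr, by simp; omega, ?_, ?_, ?_⟩
        · rwa [List.getD_append xs [x] [] rn hlen]
        · intro k hk1 hk2
          simp only [List.length_append, List.length_cons, List.length_nil] at hk1
          rcases (by omega : k = xs.length ∨ k < xs.length) with heq | hlt
          · subst heq
            rw [List.getD_append_right xs [x] [] xs.length (le_refl _)]
            simpa using hm
          · rw [List.getD_append xs [x] [] k hlt]
            exact hlast k hlt hk2
        · rwa [List.getD_append xs [x] [] rn hlen]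
      · rintro ⟨rn, hr, hlen, hmem, hlast, hc⟩
        simp only [List.length_append, List.length_cons, List.length_nil] at hlen
        rcases (by omega : rn = xs.length ∨ rn < xs.length) with heq | hlt
        · exfalso
          subst heq
          rw [List.getD_append_right xs [x] [] xs.length (le_refl _)] at hmem
          simp at hmem
          exact hm hmem
        · refine ⟨rn, hr, hlt, ?_, ?_, ?_⟩
          · rwa [List.getD_append xs [x] [] rn hlt] at hmem
          · intro k hk1 hk2
            have := hlast k (by simp; omega) hk2
            rwa [List.getD_append xs [x] [] k hk1] at this
          · rwa [List.getD_append xs [x] [] rn hlt] at hc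

-- the computed location of D_ is pvLastLoc whenever val occurs at all
lemma pvLastLoc_eq (grid : List (List Int)) (val : Int) (h : val ∈ grid.flatten) :
    pvLastLoc grid val
      = some (((grid.length - 1 - grid.reverse.findIdx (fun t => decide (val ∈ t)) : Nat) : Int),
          (((grid.getD (grid.length - 1 - grid.reverse.findIdx (fun t => decide (val ∈ t))) []).idxOf val : Nat) : Int)) := by
  induction grid using List.reverseRecOn with
  | nil => simp at h
  | append_singleton xs x ih =>
    rw [pvLastLoc_append, List.reverse_append]
    simp only [List.reverse_singleton, List.singleton_append, List.findIdx_cons]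
    by_cases hm : val ∈ x
    · rw [if_pos hm]
      simp only [hm, decide_true, cond_true]
      have h1 : (xs ++ [x]).length - 1 - 0 = xs.length := by simp
      rw [h1, List.getD_append_right xs [x] [] xs.length (le_refl _)]
      simp
    · rw [if_neg hm]
      have hm' : (decide (val ∈ x)) = false := by simp [hm]
      simp only [hm', cond_false]
      have hx : val ∈ xs.flatten := by
        simp only [List.flatten_append] at h
        simp at h
        rcases h with h | h
        · simpa using h
        · exact absurd (by simpa using h) hm
      have hfi : xs.reverse.findIdx (fun t => decide (val ∈ t)) < xs.length := by
        have hex : ∃ t ∈ xs.reverse, (fun t => decide (val ∈ t)) t = true := by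
          obtain ⟨row, hr1, hr2⟩ := List.mem_flatten.mp hx
          exact ⟨row, by simpa using hr1, by simpa using hr2⟩
        have := List.findIdx_lt_length_of_exists hex
        simpa using this
      rw [ih hx]
      have h2 : (xs ++ [x]).length - 1 - (xs.reverse.findIdx (fun t => decide (val ∈ t)) + 1)
          = xs.length - 1 - xs.reverse.findIdx (fun t => decide (val ∈ t)) := by
        simp only [List.length_append, List.length_cons, List.length_nil]
        omega
      rw [h2, List.getD_append xs [x] [] _ (by omega)]

-- D_ in terms of the located position
lemma pvD_iff (grid : List (List Int)) (val : Int) :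
    D_sub_grid grid val
      ↔ ∃ r c : Int, pvLastLoc grid val = some (r, c) ∧ c ≠ 0 ∧
          c = (grid.length : Int) - 1 ∧
          ∃ k : Nat, k < grid.length ∧ ((k : Int) - r).natAbs ≤ 1 ∧
            c + 1 < ((grid.getD k []).length : Int) := by
  unfold D_sub_grid
  constructor
  · rintro ⟨hflat, hceq, h2n, k, hkmem, hklen⟩
    refine ⟨_, _, pvLastLoc_eq grid val hflat, by omega, by omega, k, ?_, ?_, by omega⟩
    · by_contra hk
      have h0 : (grid.getD k []).length = 0 := by
        rw [List.getD_eq_default grid ([] : List Int) (Nat.le_of_not_lt hk)]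
        rfl
      omega
    · have h3 : k = grid.length - 1 - grid.reverse.findIdx (fun t => decide (val ∈ t)) - 1
          ∨ k = grid.length - 1 - grid.reverse.findIdx (fun t => decide (val ∈ t))
          ∨ k = grid.length - 1 - grid.reverse.findIdx (fun t => decide (val ∈ t)) + 1 := by
        simpa using hkmem
      omega
  · rintro ⟨r, c, hloc, hc0, hceq, k, hk, hkd, hkl⟩
    obtain ⟨rn', hr, hrn', hmem, hlast, hc⟩ := (pvLastLoc_iff grid val r c).mp hloc
    have hflat : val ∈ grid.flatten := List.mem_flatten.mpr
      ⟨grid.getD rn' [], by rw [List.getD_eq_getElem grid [] hrn']; exact List.getElem_mem hrn', hmem⟩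
    have hE := pvLastLoc_eq grid val hflat
    rw [hloc, Option.some_inj, Prod.mk.injEq] at hE
    obtain ⟨hE1, hE2⟩ := hE
    refine ⟨hflat, by omega, by omega, k, ?_, by omega⟩
    simp only [List.mem_cons, List.not_mem_nil, or_false]
    omega

-- A's cursor-mutating fill loop produces exactly the index-window form.
lemma pvFillA_eq_window (grid : List (List Int)) (nr nc : Nat) (vr vc dr dc : Int) :
    pvFillA grid nr nc vr vc dr dc = pvWindow grid (vr + dr) (vc + dc) nr nc := by
  have inner : ∀ (n : Nat) (R C : Int) (acc : List Int),
      ((List.range n).foldl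
        (fun (st2 : List Int × Int) _ => (st2.1 ++ [pvGet2 grid R (st2.2 + dc)], st2.2 + 1))
        (acc, C))
      = (acc ++ (List.range n).map (fun (j : Nat) => pvGet2 grid R (C + dc + (j : Int))), C + n) := by
    intro n
    induction n with
    | zero => intro R C acc; simp
    | succ m ihm =>
      intro R C acc
      rw [List.range_succ, List.foldl_append, ihm]
      simp only [List.foldl_cons, List.foldl_nil, List.map_append, List.map_cons,
        List.map_nil, List.append_assoc, Prod.mk.injEq]
      constructor
      · have h1 : C + (m : Int) + dc = C + dc + (m : Int) := by ring
        rw [h1]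
      · push_cast; ring
  have outer : ∀ (m : Nat) (R C : Int) (acc : List (List Int)),
      ((List.range m).foldl
        (fun (st : List (List Int) × Int × Int) _ =>
          let inn := (List.range nc).foldl
            (fun (st2 : List Int × Int) _ =>
              (st2.1 ++ [pvGet2 grid (st.2.1 + dr) (st2.2 + dc)], st2.2 + 1))
            ([], st.2.2)
          (st.1 ++ [inn.1], st.2.1 + 1, inn.2 - (nc : Int)))
        (acc, R, C))
      = (acc ++ (List.range m).map (fun (i : Nat) =>
          (List.range nc).map (fun (j : Nat) => pvGet2 grid (R + dr + (i : Int)) (C + dc + (j : Int)))),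
         R + m, C) := by
    intro m
    induction m with
    | zero => intro R C acc; simp
    | succ k ihk =>
      intro R C acc
      rw [List.range_succ, List.foldl_append, ihk]
      simp only [List.foldl_cons, List.foldl_nil, inner, List.nil_append,
        List.map_append, List.map_cons, List.map_nil, List.append_assoc, Prod.mk.injEq]
      refine ⟨?_, by push_cast; ring, by ring⟩
      have h1 : R + (k : Int) + dr = R + dr + (k : Int) := by ring
      rw [h1]
  unfold pvFillA pvWindow
  rw [outer nr vr vc []]
  simp

-- A (on a located value) equals the index-window with the edge-rule parameters.
lemma sub_grid_eq_window (grid : List (List Int)) (val : Int) (r c : Int)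
    (hs : ¬ (grid.length = 1 ∧ val = 1)) (hloc : pvLocB grid val = some (r, c)) :
    sub_grid grid val
      = pvWindow grid (if r = 0 then r else r - 1) (if c = 0 then c else c - 1)
          (if r = 0 ∨ r = (grid.length : Int) - 1 then 2 else 3)
          (if c = 0 ∨ c = (grid.length : Int) - 1 then 2 else 3) := by
  unfold sub_grid
  rw [if_neg hs, pvLocA_eq_pvLocB, hloc]
  simp only
  have e0r : r + (0 : Int) = r := by ring
  have e0c : c + (0 : Int) = c := by ring
  have e1r : r + (-1 : Int) = r - 1 := by ring
  have e1c : c + (-1 : Int) = c - 1 := by ring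
  by_cases h1 : r = 0 ∧ c = 0
  · obtain ⟨hr, hc⟩ := h1
    rw [if_pos ⟨hr, hc⟩, if_pos hr, if_pos hc, if_pos (Or.inl hr), if_pos (Or.inl hc),
      pvFillA_eq_window, e0r, e0c]
  · by_cases h2 : r = (grid.length : Int) - 1 ∧ c = 0
    · obtain ⟨hr, hc⟩ := h2
      have hr0 : ¬ r = 0 := fun h => h1 ⟨h, hc⟩
      rw [if_neg h1, if_pos ⟨hr, hc⟩, if_neg hr0, if_pos hc, if_pos (Or.inr hr),
        if_pos (Or.inl hc), pvFillA_eq_window, e1r, e0c]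
    · by_cases h3 : r = 0 ∧ c = (grid.length : Int) - 1
      · obtain ⟨hr, hc⟩ := h3
        have hc0 : ¬ c = 0 := fun h => h1 ⟨hr, h⟩
        rw [if_neg h1, if_neg h2, if_pos ⟨hr, hc⟩, if_pos hr, if_neg hc0,
          if_pos (Or.inl hr), if_pos (Or.inr hc), pvFillA_eq_window, e0r, e1c]
      · by_cases h4 : r = (grid.length : Int) - 1 ∧ c = (grid.length : Int) - 1
        · obtain ⟨hr, hc⟩ := h4
          have hr0 : ¬ r = 0 := fun h => h3 ⟨h, hc⟩
          have hc0 : ¬ c = 0 := fun h => h2 ⟨hr, h⟩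
          rw [if_neg h1, if_neg h2, if_neg h3, if_pos ⟨hr, hc⟩, if_neg hr0, if_neg hc0,
            if_pos (Or.inr hr), if_pos (Or.inr hc), pvFillA_eq_window, e1r, e1c]
        · by_cases h5 : r = 0
          · have hc0 : ¬ c = 0 := fun h => h1 ⟨h5, h⟩
            have hcn : ¬ c = (grid.length : Int) - 1 := fun h => h3 ⟨h5, h⟩
            rw [if_neg h1, if_neg h2, if_neg h3, if_neg h4, if_pos h5, if_pos h5,
              if_neg hc0, if_pos (Or.inl h5), if_neg (fun h => h.elim hc0 hcn),
              pvFillA_eq_window, e0r, e1c]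
          · by_cases h6 : r = (grid.length : Int) - 1
            · have hc0 : ¬ c = 0 := fun h => h2 ⟨h6, h⟩
              have hcn : ¬ c = (grid.length : Int) - 1 := fun h => h4 ⟨h6, h⟩
              rw [if_neg h1, if_neg h2, if_neg h3, if_neg h4, if_neg h5, if_pos h6,
                if_neg h5, if_neg hc0, if_pos (Or.inr h6), if_neg (fun h => h.elim hc0 hcn),
                pvFillA_eq_window, e1r, e1c]
            · have hrn : ¬ (r = 0 ∨ r = (grid.length : Int) - 1) := fun h => h.elim h5 h6
              by_cases h7 : c = 0
              · rw [if_neg h1, if_neg h2, if_neg h3, if_neg h4, if_neg h5, if_neg h6,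
                  if_pos h7, if_neg h5, if_pos h7, if_neg hrn, if_pos (Or.inl h7),
                  pvFillA_eq_window, e1r, e0c]
              · by_cases h8 : c = (grid.length : Int) - 1
                · rw [if_neg h1, if_neg h2, if_neg h3, if_neg h4, if_neg h5, if_neg h6,
                    if_neg h7, if_pos h8, if_neg h5, if_neg h7, if_neg hrn,
                    if_pos (Or.inr h8), pvFillA_eq_window, e1r, e1c]
                · have hcn : ¬ (c = 0 ∨ c = (grid.length : Int) - 1) := fun h => h.elim h7 h8
                  rw [if_neg h1, if_neg h2, if_neg h3, if_neg h4, if_neg h5, if_neg h6,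
                    if_neg h7, if_neg h8, if_neg h5, if_neg h7, if_neg hrn, if_neg hcn,
                    pvFillA_eq_window, e1r, e1c]

-- filtering an enumeration by an interval condition keeps a contiguous block
lemma pvFiltAux {α β : Type} (f : α → β) (c a nc : Int) :
    ∀ (xs : List α) (s : Int),
      (∀ j : Int, s ≤ j → j < s + xs.length → (((j - c).natAbs ≤ 1) ↔ (a ≤ j ∧ j < a + nc))) →
      ((PySem.List.enumerate xs s).filter (fun p => decide ((p.1 - c).natAbs ≤ 1))).map (fun p => f p.2)
        = ((xs.drop (a - s).toNat).take (a + nc - max a s).toNat).map f := by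
  intro xs
  induction xs with
  | nil => intro s _; simp [PySem.List.enumerate_nil]
  | cons x xs ih =>
    intro s hiff
    have hlen : ((x :: xs).length : Int) = (xs.length : Int) + 1 := by
      simp
    have hiff' : ∀ j : Int, s + 1 ≤ j → j < (s + 1) + xs.length →
        (((j - c).natAbs ≤ 1) ↔ (a ≤ j ∧ j < a + nc)) := by
      intro j h1 h2
      exact hiff j (by omega) (by rw [hlen]; omega)
    have hs := hiff s (le_refl s) (by rw [hlen]; omega)
    rw [PySem.List.enumerate_cons]
    by_cases hsel : (s - c).natAbs ≤ 1
    · have hin : a ≤ s ∧ s < a + nc := hs.mp hsel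
      have h0 : (a - s).toNat = 0 := by omega
      have h1 : (a + nc - max a s).toNat = (a + nc - max a (s + 1)).toNat + 1 := by omega
      rw [List.filter_cons_of_pos (by simpa using hsel), List.map_cons, ih (s + 1) hiff',
        h0, List.drop_zero, h1, List.take_succ_cons, List.map_cons]
      congr 1
      have h2 : (a - (s + 1)).toNat = 0 := by omega
      rw [h2, List.drop_zero]
    · rw [List.filter_cons_of_neg (by simpa using hsel), ih (s + 1) hiff']
      rcases (by omega : s < a ∨ a + nc ≤ s) with hlt | hge
      · have h0 : (a - s).toNat = (a - (s + 1)).toNat + 1 := by omega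
        have h1 : max a s = a := by omega
        have h2 : max a (s + 1) = a := by omega
        rw [h0, List.drop_succ_cons, h1, h2]
      · have h0 : (a + nc - max a s).toNat = 0 := by omega
        have h1 : (a + nc - max a (s + 1)).toNat = 0 := by omega
        simp [h0, h1]

-- a contiguous block of a list, as a map over an index range
lemma pvDropTake {α : Type} (xs : List α) (d : α) (a nc : Nat) (h : a + nc ≤ xs.length) :
    (xs.drop a).take nc = (List.range nc).map (fun j => xs.getD (a + j) d) := by
  apply List.ext_getElem
  · simp; omega
  · intro k h1 h2
    simp only [List.getElem_take, List.getElem_drop, List.getElem_map, List.getElem_range]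
    have hk : a + k < xs.length := by
      simp at h1; omega
    rw [List.getD_eq_getElem xs d hk]

lemma pyGet?_some_lt {α : Type} (xs : List α) (i : Int) (x : α)
    (h : PySem.List.pyGet? xs i = some x) : i < (xs.length : Int) := by
  by_contra hc
  rw [(PySem.List.pyGet?_eq_none_iff xs i).mpr (by simp [PySem.Raise.InRange]; omega)] at h
  simp at h

-- the index-window equals B's double filter, under the in-range facts Pre_
-- supplies and the interval characterizations the case analysis supplies
lemma window_eq_filter (grid : List (List Int)) (r c r0 c0 : Int) (nr nc : Nat)
    (hr0 : 0 ≤ r0) (hc0 : 0 ≤ c0) (hnr : 0 < nr) (hnc : 0 < nc)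
    (hPre : ∀ i : Nat, i < nr → ∃ row, PySem.List.pyGet? grid (r0 + (i : Int)) = some row ∧
        ∀ j : Nat, j < nc → c0 + (j : Int) < (row.length : Int))
    (hrowiff : ∀ i : Int, 0 ≤ i → i < (grid.length : Int) →
        (((i - r).natAbs ≤ 1) ↔ (r0 ≤ i ∧ i < r0 + nr)))
    (hcoliff : ∀ i : Nat, i < nr →
        ∀ j : Int, 0 ≤ j → j < ((grid.getD (r0.toNat + i) []).length : Int) →
          (((j - c).natAbs ≤ 1) ↔ (c0 ≤ j ∧ j < c0 + nc))) :
    pvWindow grid r0 c0 nr nc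
      = ((PySem.List.enumerate grid).filter (fun p => decide ((p.1 - r).natAbs ≤ 1))).map
          (fun p => ((PySem.List.enumerate p.2).filter (fun q => decide ((q.1 - c).natAbs ≤ 1))).map (fun q => q.2)) := by
  -- grid rows r0 .. r0+nr-1 exist
  have hrows : r0.toNat + nr ≤ grid.length := by
    obtain ⟨row, hrow, -⟩ := hPre (nr - 1) (by omega)
    have := pyGet?_some_lt grid _ row hrow
    omega
  -- rows facts in getD form
  have hrowfact : ∀ i : Nat, i < nr →
      PySem.List.pyGet? grid (r0 + (i : Int)) = some (grid.getD (r0.toNat + i) []) ∧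
      c0.toNat + nc ≤ (grid.getD (r0.toNat + i) []).length := by
    intro i hi
    obtain ⟨row, hrow, hb⟩ := hPre i hi
    have hlt := pyGet?_some_lt grid _ row hrow
    have hidx : r0.toNat + i < grid.length := by omega
    have hget : PySem.List.pyGet? grid (r0 + (i : Int)) = some (grid[(r0 + (i : Int)).toNat]) :=
      PySem.List.pyGet?_eq_some_getElem grid (by omega) (by omega)
    have hEq : grid[(r0 + (i : Int)).toNat] = grid.getD (r0.toNat + i) [] := by
      rw [List.getD_eq_getElem grid [] hidx]
      congr 1
      omega
    have hroweq : row = grid.getD (r0.toNat + i) [] := by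
      rw [← hEq]
      exact Option.some_inj.mp (hrow.symm.trans hget)
    refine ⟨by rw [hrow, hroweq], ?_⟩
    have h2 := hb (nc - 1) (by omega)
    rw [hroweq] at h2
    omega
  -- the B side: outer filter = contiguous block of rows
  have houter := pvFiltAux
      (fun row : List Int =>
        ((PySem.List.enumerate row).filter (fun q => decide ((q.1 - c).natAbs ≤ 1))).map (fun q => q.2))
      r r0 (nr : Int) grid 0
      (by
        intro j h1 h2
        exact hrowiff j h1 (by simpa using h2))
  rw [houter]
  have hm1 : (r0 - 0).toNat = r0.toNat := by omega
  have hm2 : (r0 + nr - max r0 0).toNat = nr := by omega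
  rw [hm1, hm2, pvDropTake grid [] r0.toNat nr hrows, List.map_map]
  unfold pvWindow
  apply List.map_congr_left
  intro i hi
  have hi' : i < nr := List.mem_range.mp hi
  obtain ⟨hget, hlen⟩ := hrowfact i hi'
  -- inner filter = contiguous block of the row
  have hinner := pvFiltAux (fun x : Int => x) c c0 (nc : Int) (grid.getD (r0.toNat + i) []) 0
      (by
        intro j h1 h2
        exact hcoliff i hi' j h1 (by simpa using h2))
  simp only [Function.comp]
  have hin2 : ((PySem.List.enumerate (grid.getD (r0.toNat + i) [])).filter
        (fun q => decide ((q.1 - c).natAbs ≤ 1))).map (fun q => q.2)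
      = (((grid.getD (r0.toNat + i) []).drop (c0 - 0).toNat).take (c0 + nc - max c0 0).toNat).map (fun x : Int => x) := hinner
  rw [hin2]
  have hm3 : (c0 - 0).toNat = c0.toNat := by omega
  have hm4 : (c0 + nc - max c0 0).toNat = nc := by omega
  rw [hm3, hm4, pvDropTake (grid.getD (r0.toNat + i) []) 0 c0.toNat nc hlen, List.map_map]
  apply List.map_congr_left
  intro j hj
  have hj' : j < nc := List.mem_range.mp hj
  simp only [Function.comp]
  unfold pvGet2
  rw [hget]
  have hjlt : c0.toNat + j < (grid.getD (r0.toNat + i) []).length := by omega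
  have hget2 : PySem.List.pyGet? (grid.getD (r0.toNat + i) []) (c0 + (j : Int))
      = some ((grid.getD (r0.toNat + i) [])[(c0 + (j : Int)).toNat]) :=
    PySem.List.pyGet?_eq_some_getElem _ (by omega) (by omega)
  rw [Option.bind_some, hget2]
  simp only [Option.getD_some]
  rw [List.getD_eq_getElem _ 0 hjlt]
  congr 1
  omega

-- extract A's in-range reads from Pre_ (non-special, value located)
lemma pre_extract (grid : List (List Int)) (val : Int) (r c : Int)
    (hs : ¬ (grid.length = 1 ∧ val = 1)) (hloc : pvLastLoc grid val = some (r, c))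
    (hpre : Pre_sub_grid grid val) :
    ∀ i : Nat, i < (if r = 0 ∨ r = (grid.length : Int) - 1 then 2 else 3) →
      ∃ row, PySem.List.pyGet? grid ((if r = 0 then r else r - 1) + (i : Int)) = some row ∧
        ∀ j : Nat, j < (if c = 0 ∨ c = (grid.length : Int) - 1 then 2 else 3) →
          (if c = 0 then c else c - 1) + (j : Int) < (row.length : Int) := by
  unfold Pre_sub_grid pvPreCheck at hpre
  rw [hloc] at hpre
  rw [Bool.or_eq_true, decide_eq_true_eq] at hpre
  rcases hpre with h | h
  · exact absurd h hs
  · simp only [List.all_eq_true, List.mem_range] at h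
    intro i hi
    have hIt := h i hi
    cases hg : PySem.List.pyGet? grid ((if r = 0 then r else r - 1) + (i : Int)) with
    | none => rw [hg] at hIt; exact absurd hIt (by simp)
    | some row =>
      rw [hg] at hIt
      refine ⟨row, rfl, ?_⟩
      intro j hj
      simp only [List.all_eq_true, List.mem_range, decide_eq_true_eq] at hIt
      exact hIt j hj

-- index-k membership in an enumeration
lemma mem_enumerate_idx {α : Type} :
    ∀ (xs : List α) (s : Int) (k : Nat) (h : k < xs.length),
      (s + (k : Int), xs[k]) ∈ PySem.List.enumerate xs s := by
  intro xs
  induction xs with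
  | nil => intro s k h; simp at h
  | cons x xs ih =>
    intro s k h
    rw [PySem.List.enumerate_cons]
    cases k with
    | zero => simp
    | succ m =>
      apply List.mem_cons_of_mem
      have hm : m < xs.length := by simpa using h
      have := ih (s + 1) m hm
      have he : (s + ((m + 1 : Nat) : Int)) = (s + 1 + (m : Int)) := by push_cast; ring
      rw [he, List.getElem_cons_succ]
      exact this

-- extract the row-length bound from ¬D_ in the misclassified-column case
lemma nD_extract (grid : List (List Int)) (val : Int) (r c : Int)
    (hloc : pvLastLoc grid val = some (r, c)) (hnD : ¬ D_sub_grid grid val)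
    (hc0 : c ≠ 0) (hcn : c = (grid.length : Int) - 1) :
    ∀ k : Nat, k < grid.length → (((k : Int) - r).natAbs ≤ 1) →
      ((grid.getD k []).length : Int) ≤ c + 1 := by
  intro k hk habs
  by_contra hgt
  exact hnD ((pvD_iff grid val).mpr ⟨r, c, hloc, hc0, hcn, k, hk, habs, by omega⟩)

-- locations reported by pvLastLoc are nonnegative
lemma pvLastLoc_nonneg (grid : List (List Int)) (val : Int) (r c : Int)
    (hloc : pvLastLoc grid val = some (r, c)) : 0 ≤ r ∧ 0 ≤ c := by
  unfold pvLastLoc at hloc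
  cases hf : (PySem.List.enumerate grid).reverse.find? (fun p => p.2.contains val) with
  | none => rw [hf] at hloc; simp at hloc
  | some p =>
    rw [hf] at hloc
    rw [Option.some_inj, Prod.mk.injEq] at hloc
    obtain ⟨hl1, hl2⟩ := hloc
    have hmem : p ∈ (PySem.List.enumerate grid).reverse := List.mem_of_find?_eq_some hf
    rw [List.mem_reverse] at hmem
    have hfst : p.1 ∈ (PySem.List.enumerate grid).map (·.1) := List.mem_map_of_mem hmem
    rw [PySem.List.map_fst_enumerate, PySem.List.mem_pyRange_one] at hfst
    constructor
    · rw [← hl1]; exact hfst.1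
    · rw [← hl2]; positivity

-- ===== VERDICT (by name: the statements are the Claim_ definitions above) =====
theorem sub_grid_spec : Claim_unchanged_sub_grid := by
  unfold Claim_unchanged_sub_grid
  intro grid val _ hpre
  unfold Spec_sub_grid
  intro hnD
  by_cases hs : grid.length = 1 ∧ val = 1
  · unfold sub_grid sub_grid_alt
    rw [if_pos hs, if_pos hs]
  · cases hloc : pvLastLoc grid val with
    | none =>
      unfold Pre_sub_grid pvPreCheck at hpre
      rw [hloc] at hpre
      rw [Bool.or_eq_true, decide_eq_true_eq] at hpre
      rcases hpre with h | h
      · exact absurd h hs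
      · exact absurd h (by simp)
    | some rc =>
      obtain ⟨r, c⟩ := rc
      have hlocB : pvLocB grid val = some (r, c) := by
        rw [pvLocB_eq_pvLastLoc, hloc]
      obtain ⟨hr0, hc0⟩ := pvLastLoc_nonneg grid val r c hloc
      have hPre := pre_extract grid val r c hs hloc hpre
      -- B's shape
      have hB : sub_grid_alt grid val
          = ((PySem.List.enumerate grid).filter (fun p => decide ((p.1 - r).natAbs ≤ 1))).map
              (fun p => ((PySem.List.enumerate p.2).filter (fun q => decide ((q.1 - c).natAbs ≤ 1))).map (fun q => q.2)) := by
        unfold sub_grid_alt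
        rw [if_neg hs, hlocB]
      rw [sub_grid_eq_window grid val r c hs hlocB, hB]
      -- row count bound: rows r0 .. r0+nr-1 exist, giving r < n etc.
      have hrows : (if r = 0 then r else r - 1)
          + (((if r = 0 ∨ r = (grid.length : Int) - 1 then 2 else 3) : Nat) : Int) - 1
          < (grid.length : Int) := by
        obtain ⟨row, hrow, -⟩ := hPre ((if r = 0 ∨ r = (grid.length : Int) - 1 then 2 else 3) - 1) (by split <;> omega)
        have hlt := pyGet?_some_lt grid _ row hrow
        by_cases h5 : r = 0
        · rw [if_pos h5, if_pos (Or.inl h5)] at hlt ⊢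
          push_cast at hlt ⊢
          omega
        · by_cases h6 : r = (grid.length : Int) - 1
          · rw [if_neg h5, if_pos (Or.inr h6)] at hlt ⊢
            push_cast at hlt ⊢
            omega
          · rw [if_neg h5, if_neg (by tauto)] at hlt ⊢
            push_cast at hlt ⊢
            omega
      apply window_eq_filter grid r c _ _ _ _ (by split <;> omega) (by split <;> omega)
        (by split <;> omega) (by split <;> omega) hPre
      · -- row interval characterization
        intro i hige hilt
        have hrlt : r < (grid.length : Int) := by
          by_cases h5 : r = 0
          · omega
          · by_cases h6 : r = (grid.length : Int) - 1
            · omega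
            · rw [if_neg h5, if_neg (by tauto)] at hrows
              push_cast at hrows
              omega
        by_cases h5 : r = 0
        · rw [if_pos h5, if_pos (Or.inl h5)]
          push_cast
          omega
        · by_cases h6 : r = (grid.length : Int) - 1
          · rw [if_neg h5, if_pos (Or.inr h6)]
            push_cast
            omega
          · rw [if_neg h5, if_neg (by tauto)]
            push_cast
            omega
      · -- column interval characterization
        intro i hi j hjge hjlt
        by_cases h7 : c = 0
        · rw [if_pos h7, if_pos (Or.inl h7)]
          push_cast
          omega
        · by_cases h8 : c = (grid.length : Int) - 1
          · -- the misclassified-right-edge case: ¬D_ bounds the selected rows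
            rw [if_neg h7, if_pos (Or.inr h8)]
            set r0 : Int := if r = 0 then r else r - 1 with hr0def
            have hr0nn : 0 ≤ r0 := by rw [hr0def]; split <;> omega
            have hr0lo : r - 1 ≤ r0 := by rw [hr0def]; split <;> omega
            have hr0hi : r0 ≤ r := by rw [hr0def]; split <;> omega
            have hup : r0 + (((if r = 0 ∨ r = (grid.length : Int) - 1 then 2 else 3 : Nat)) : Int) - 1 ≤ r + 1 := by
              by_cases h5 : r = 0
              · rw [hr0def, if_pos h5, if_pos (Or.inl h5)]
                push_cast
                omega
              · by_cases h6 : r = (grid.length : Int) - 1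
                · rw [hr0def, if_neg h5, if_pos (Or.inr h6)]
                  push_cast
                  omega
                · rw [hr0def, if_neg h5, if_neg (by tauto)]
                  push_cast
                  omega
            have hiI : (i : Int) < (((if r = 0 ∨ r = (grid.length : Int) - 1 then 2 else 3 : Nat)) : Int) := by
              exact_mod_cast hi
            have hkn : r0.toNat + i < grid.length := by omega
            have habs : ((((r0.toNat + i : Nat)) : Int) - r).natAbs ≤ 1 := by push_cast; omega
            have hbound := nD_extract grid val r c hloc hnD h7 h8 (r0.toNat + i) hkn habs
            push_cast
            omega
          · rw [if_neg h7, if_neg (by tauto)]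
            push_cast
            omega

theorem sub_grid_changed : Claim_changed_sub_grid := by
  unfold Claim_changed_sub_grid
  decide

theorem sub_grid_tight : Claim_exact_sub_grid := by
  unfold Claim_exact_sub_grid
  intro grid val _ _ hD
  obtain ⟨r, c, hloc, hc0, hcn, k, hk, hksel, hklen⟩ := (pvD_iff grid val).mp hD
  obtain ⟨hrge, hcge⟩ := pvLastLoc_nonneg grid val r c hloc
  have hc1 : 1 ≤ c := by omega
  have hs : ¬ (grid.length = 1 ∧ val = 1) := by
    intro h
    rw [h.1] at hcn
    simp at hcn
    omega
  have hlocB : pvLocB grid val = some (r, c) := by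
    rw [pvLocB_eq_pvLastLoc, hloc]
  intro hEq
  -- A's rows all have length 2 (nc = 2 since c = n-1 ≠ 0)
  have hA : ∀ x ∈ sub_grid grid val, x.length = 2 := by
    rw [sub_grid_eq_window grid val r c hs hlocB, if_pos (Or.inr hcn)]
    intro x hx
    unfold pvWindow at hx
    rw [List.mem_map] at hx
    obtain ⟨i, -, hxeq⟩ := hx
    rw [← hxeq]
    simp
  -- B contains the full 3-wide row of the witness
  have hpmem : (((k : Nat) : Int), grid.getD k []) ∈ PySem.List.enumerate grid := by
    have := mem_enumerate_idx grid 0 k hk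
    rw [List.getD_eq_getElem grid [] hk]
    simpa using this
  have hB : ((PySem.List.enumerate (grid.getD k [])).filter (fun q => decide ((q.1 - c).natAbs ≤ 1))).map (fun q => q.2)
      ∈ sub_grid_alt grid val := by
    unfold sub_grid_alt
    rw [if_neg hs, hlocB]
    exact List.mem_map_of_mem (List.mem_filter.mpr ⟨hpmem, by simpa using hksel⟩)
  have hlen3 : (((PySem.List.enumerate (grid.getD k [])).filter (fun q => decide ((q.1 - c).natAbs ≤ 1))).map (fun q => q.2)).length = 3 := by
    have h' : ((PySem.List.enumerate (grid.getD k [])).filter (fun q => decide ((q.1 - c).natAbs ≤ 1))).map (fun q => q.2)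
        = (((grid.getD k []).drop (c - 1 - 0).toNat).take (c - 1 + 3 - max (c - 1) 0).toNat).map (fun x : Int => x) :=
      pvFiltAux (fun x : Int => x) c (c - 1) 3 (grid.getD k []) 0
        (by intro j h1 h2; omega)
    rw [h']
    simp only [List.length_map, List.length_take, List.length_drop]
    omega
  rw [hEq] at hA
  have := hA _ hB
  rw [hlen3] at this
  exact absurd this (by norm_num)
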